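-- pv_equiv track=rewrite | github.com/rajeshwerkushwaha/EdTech_CSF | convert_data.py | create_multiple_rows
-- ===== SOURCE A (Python) =====
-- def create_multiple_rows(input_row, cell_data, multi_count):
--     cell_data_list = []
--     multi_rows = []
--     while cell_data.find(",") != -1:
--         position = cell_data.find(",")
--         cell_data_list.append(cell_data[:position])
--         cell_data = cell_data[position+1:]
--     if cell_data != '':
--         cell_data_list.append(cell_data)
--     for data in cell_data_list:
--         row_data = []
--         for count in range(len(input_row)):
--             if count == multi_count:
--                 row_data.append(data.strip())
--             else:
--                 row_data.append(input_row[count].strip())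
--         multi_rows.append(row_data)
--     return multi_rows
-- ===== SOURCE B (Python) =====
-- def create_multiple_rows(input_row, cell_data, multi_count):
--     template = [x.strip() for x in input_row]
--     values = cell_data.split(',')
--     if values and values[-1] == '':
--         values.pop()
--     rows = []
--     for data in values:
--         row = template[:]
--         if 0 <= multi_count < len(row):
--             row[multi_count] = data.strip()
--         rows.append(row)
--     return rows
-- ===== Notes on version B (the rewrite author's own statement) =====
-- stated objective: simpler
-- what changed: B replaces A's manual while/find comma-cutting loop and the per-row index scan that re-strips every column with a single str.split (dropping one trailing empty field), a template of stripped columns built once, and a per-value copy that patches just the multi_count cell when it is in range.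
import Mathlib
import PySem

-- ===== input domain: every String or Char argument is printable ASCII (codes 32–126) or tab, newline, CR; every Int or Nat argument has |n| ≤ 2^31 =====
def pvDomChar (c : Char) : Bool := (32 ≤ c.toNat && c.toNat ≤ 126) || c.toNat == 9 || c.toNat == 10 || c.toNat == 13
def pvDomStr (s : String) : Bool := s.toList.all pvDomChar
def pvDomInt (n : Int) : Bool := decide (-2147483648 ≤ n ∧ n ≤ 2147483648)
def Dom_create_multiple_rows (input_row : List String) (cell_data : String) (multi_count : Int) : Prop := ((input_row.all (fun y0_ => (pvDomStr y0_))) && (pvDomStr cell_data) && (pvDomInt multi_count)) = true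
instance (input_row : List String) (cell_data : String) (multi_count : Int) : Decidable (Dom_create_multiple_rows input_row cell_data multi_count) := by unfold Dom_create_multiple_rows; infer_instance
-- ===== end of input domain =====

-- B builds the stripped row template once and patches one cell per value, instead of A's
-- find-loop splitting and per-row full index scan; proved equal on ALL inputs (A is total).

-- ===== PORT A =====

-- the `while cell_data.find(",") != -1` loop plus the trailing `if cell_data != ''` append
def pvSplitLoopA (cell_data : String) (acc : List String) : List String :=
  if h : PySem.Str.find cell_data "," ≠ -1 then
    let position := PySem.Str.find cell_data ","
    pvSplitLoopA (PySem.Str.slice cell_data (some (position + 1)) none)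
      (acc ++ [PySem.Str.slice cell_data none (some position)])
  else if cell_data ≠ "" then acc ++ [cell_data] else acc
termination_by cell_data.toList.length
decreasing_by
  have h0 : 0 ≤ PySem.Str.find cell_data "," := by
    have := PySem.Chars.neg_one_le_find cell_data.toList (",").toList
    simp only [PySem.Str.find] at h ⊢; omega
  have hocc := (PySem.Chars.find_spec (s := cell_data.toList) (sub := (",").toList)
      (by simpa [PySem.Str.find] using h0)).1
  have hlen : (PySem.Str.find cell_data ",").toNat < cell_data.toList.length := by
    rcases hocc with ⟨t, ht⟩
    have hd : cell_data.toList.drop (PySem.Chars.find cell_data.toList (",").toList).toNat ≠ [] := by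
      intro hnil; rw [hnil] at ht; simp at ht
    have := List.drop_eq_nil_iff.not.mp hd
    simp only [PySem.Str.find]
    omega
  simp only [PySem.Str.slice, String.toList_ofList, PySem.Chars.slice_eq_listSlice]
  rw [PySem.List.slice_from (a := PySem.Str.find cell_data "," + 1) cell_data.toList (by omega)]
  simp only [List.length_drop]
  omega

def create_multiple_rows (input_row : List String) (cell_data : String) (multi_count : Int) : List (List String) :=
  let cell_data_list := pvSplitLoopA cell_data []
  cell_data_list.foldl (fun multi_rows data =>
    multi_rows ++ [(PySem.List.pyRange 0 input_row.length 1).foldl (fun row_data count =>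
      row_data ++ [if count = multi_count then PySem.Str.strip data
                   else PySem.Str.strip (PySem.List.pyGetD input_row count "")]) []]) []

-- ===== PORT B =====
def create_multiple_rows_alt (input_row : List String) (cell_data : String) (multi_count : Int) : List (List String) :=
  let template := input_row.map PySem.Str.strip
  let values0 := (PySem.Str.split? cell_data ",").getD []
  let values := if values0.getLast? = some "" then values0.dropLast else values0
  values.map (fun data =>
    if 0 ≤ multi_count ∧ multi_count < (template.length : Int) then
      template.set multi_count.toNat (PySem.Str.strip data)
    else template)

-- ===== PRECONDITION & SPEC =====
def Spec_create_multiple_rows (input_row : List String) (cell_data : String) (multi_count : Int) (out : List (List String)) : Prop := out = create_multiple_rows_alt input_row cell_data multi_count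
instance (input_row : List String) (cell_data : String) (multi_count : Int) (out : List (List String)) : Decidable (Spec_create_multiple_rows input_row cell_data multi_count out) := by unfold Spec_create_multiple_rows; infer_instance

-- ===== CLAIM (what is proved, stated in full; the proofs are below) =====
def Claim_equal_create_multiple_rows : Prop := ∀ (input_row : List String) (cell_data : String) (multi_count : Int), Dom_create_multiple_rows input_row cell_data multi_count → Spec_create_multiple_rows input_row cell_data multi_count (create_multiple_rows input_row cell_data multi_count)

-- ===== LEMMAS AND PROOFS =====

-- structural-recursion form of splitting a char list on ','
def pvSp : List Char → List (List Char)
  | [] => [[]]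
  | c :: t => if c = ',' then [] :: pvSp t else (pvSp t).modifyHead (c :: ·)

theorem pvSplitOn_go_eq (fuel : Nat) (l cur : List Char) (acc : List (List Char))
    (hf : l.length ≤ fuel) :
    PySem.Chars.splitOn.go [','] fuel l cur acc
      = acc.reverse ++ (pvSp l).modifyHead (cur.reverse ++ ·) := by
  induction fuel generalizing l cur acc with
  | zero =>
    have : l = [] := by simpa using hf
    subst this
    simp [PySem.Chars.splitOn.go, pvSp]
  | succ f ih =>
    cases l with
    | nil => simp [PySem.Chars.splitOn.go, pvSp]
    | cons c rest =>
      rw [PySem.Chars.splitOn.go]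
      by_cases hc : c = ','
      · subst hc
        rw [if_pos (by simp [List.isPrefixOf])]
        simp only [List.length_cons, List.length_nil, Nat.zero_add, List.drop_succ_cons, List.drop_zero]
        rw [ih rest [] (cur.reverse :: acc) (by simp at hf; omega)]
        simp [pvSp]
        cases pvSp rest <;> simp [List.modifyHead]
      · rw [if_neg (by simp [List.isPrefixOf]; exact fun hcc => absurd hcc.symm hc)]
        rw [ih rest (c :: cur) acc (by simp at hf; omega)]
        simp only [pvSp, if_neg hc]
        cases h : pvSp rest with
        | nil => simp [List.modifyHead]
        | cons a b => simp [List.modifyHead]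

theorem pvSp_eq_splitOn (l : List Char) : PySem.Chars.splitOn l [','] = pvSp l := by
  rw [PySem.Chars.splitOn, pvSplitOn_go_eq l.length.succ l [] [] (by omega)]
  cases h : pvSp l <;> simp [List.modifyHead]

theorem pvFind_go_comma (l : List Char) (k : Nat) :
    PySem.Chars.find.go [','] l k
      = if PySem.Chars.find.go [','] l 0 = -1 then -1 else PySem.Chars.find.go [','] l 0 + k := by
  induction l generalizing k with
  | nil => simp [PySem.Chars.find.go, List.isEmpty]
  | cons c t ih =>
    rw [PySem.Chars.find.go]
    by_cases hc : c = ','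
    · subst hc
      rw [if_pos (by simp [List.isPrefixOf])]
      rw [show PySem.Chars.find.go [','] (',' :: t) 0 = ((0:Nat):Int) by
        rw [PySem.Chars.find.go]; rw [if_pos (by simp [List.isPrefixOf])]]
      simp
    · have hp : (([','] : List Char).isPrefixOf (c :: t)) = false := by
        simp [List.isPrefixOf]; exact fun hcc => absurd hcc.symm hc
      rw [if_neg (by simp [hp])]
      rw [ih (k+1)]
      rw [show PySem.Chars.find.go [','] (c :: t) 0 = PySem.Chars.find.go [','] t 1 by
        rw [PySem.Chars.find.go]; rw [if_neg (by simp [hp])]]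
      rw [ih 1]
      have hge : -1 ≤ PySem.Chars.find.go [','] t 0 := by
        have := PySem.Chars.neg_one_le_find t [',']
        simpa [PySem.Chars.find] using this
      by_cases h0 : PySem.Chars.find.go [','] t 0 = -1
      · simp [h0]
      · rw [if_neg h0]
        rw [if_neg (by omega)]
        push_cast
        omega

theorem pvFind_comma_cons (c : Char) (t : List Char) :
    PySem.Chars.find (c :: t) [',']
      = if c = ',' then 0
        else if PySem.Chars.find t [','] = -1 then -1
        else PySem.Chars.find t [','] + 1 := by
  rw [PySem.Chars.find, PySem.Chars.find.go]
  by_cases hc : c = ','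
  · subst hc; rw [if_pos (by simp [List.isPrefixOf])]; simp
  · have hp : (([','] : List Char).isPrefixOf (c :: t)) = false := by
      simp [List.isPrefixOf]; exact fun hcc => absurd hcc.symm hc
    rw [if_neg (by simp [hp]), if_neg hc, pvFind_go_comma t 1]
    simp [PySem.Chars.find]

theorem pvFind_neg_one_iff (l : List Char) :
    PySem.Chars.find l [','] = -1 ↔ ',' ∉ l := by
  rw [PySem.Chars.find_eq_neg_one_iff]
  constructor
  · intro h hm
    rcases List.append_of_mem hm with ⟨s1, s2, rfl⟩
    exact h ⟨s1, s2, by simp⟩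
  · intro h hinf
    exact h (by simpa using hinf.mem (by simp))

theorem pvSp_no_comma (l : List Char) (h : ',' ∉ l) : pvSp l = [l] := by
  induction l with
  | nil => rfl
  | cons c t ih =>
    simp only [pvSp]
    rw [if_neg (by intro hc; exact h (by simp [hc]))]
    rw [ih (by intro hm; exact h (by simp [hm]))]
    simp [List.modifyHead]

theorem pvSp_ne_nil (l : List Char) : pvSp l ≠ [] := by
  cases l with
  | nil => simp [pvSp]
  | cons c t =>
    simp only [pvSp]
    split
    · simp
    · cases h : pvSp t
      · exact absurd h (pvSp_ne_nil t)
      · simp [List.modifyHead]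

theorem pvSp_chunk (l : List Char) (p : Int) (hp : 0 ≤ p)
    (h : PySem.Chars.find l [','] = p) :
    pvSp l = l.take p.toNat :: pvSp (l.drop (p.toNat + 1)) := by
  induction l generalizing p with
  | nil =>
    rw [show PySem.Chars.find ([] : List Char) [','] = -1 by decide] at h
    omega
  | cons c t ih =>
    rw [pvFind_comma_cons] at h
    by_cases hc : c = ','
    · rw [if_pos hc] at h
      subst hc
      have : p = 0 := h.symm
      subst this
      simp [pvSp]
    · rw [if_neg hc] at h
      by_cases h0 : PySem.Chars.find t [','] = -1
      · rw [if_pos h0] at h; omega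
      · rw [if_neg h0] at h
        have hq : 0 ≤ PySem.Chars.find t [','] := by
          have := PySem.Chars.neg_one_le_find t [',']
          omega
        have := ih (PySem.Chars.find t [',']) hq rfl
        have hpt : p.toNat = (PySem.Chars.find t [',']).toNat + 1 := by omega
        simp only [pvSp, if_neg hc, this, hpt]
        simp [List.modifyHead, List.take, List.drop]

def pvDropTE (l : List (List Char)) : List (List Char) :=
  if l.getLast? = some [] then l.dropLast else l

theorem pvCommaToList : (",").toList = [','] := by decide

theorem pvDropTE_cons (x : List Char) (rest : List (List Char)) (h : rest ≠ []) :
    pvDropTE (x :: rest) = x :: pvDropTE rest := by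
  match rest, h with
  | r :: rs, _ =>
    unfold pvDropTE
    have h1 : (x :: r :: rs).getLast? = (r :: rs).getLast? := by
      simp [List.getLast?_cons]
    rw [h1, List.dropLast_cons_of_ne_nil (by simp : (r :: rs : List (List Char)) ≠ [])]
    split <;> rfl

theorem pvSplitLoopA_eq (s : String) (acc : List String) :
    pvSplitLoopA s acc = acc ++ (pvDropTE (pvSp s.toList)).map String.ofList := by
  induction s, acc using pvSplitLoopA.induct with
  | case1 s acc h pos ih =>
    rw [pvSplitLoopA, dif_pos h]
    rw [ih]
    have h0 : 0 ≤ PySem.Str.find s "," := by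
      have := PySem.Chars.neg_one_le_find s.toList (",").toList
      simp only [PySem.Str.find] at h ⊢; omega
    have hfc : PySem.Chars.find s.toList [','] = PySem.Str.find s "," := by
      simp [PySem.Str.find, pvCommaToList]
    have hchunk := pvSp_chunk s.toList (PySem.Str.find s ",") h0 hfc
    rw [hchunk, pvDropTE_cons _ _ (pvSp_ne_nil _)]
    have hslice1 : (PySem.Str.slice s (some (PySem.Str.find s "," + 1)) none).toList
        = s.toList.drop ((PySem.Str.find s ",").toNat + 1) := by
      simp only [PySem.Str.slice, String.toList_ofList, PySem.Chars.slice_eq_listSlice]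
      rw [PySem.List.slice_from (a := PySem.Str.find s "," + 1) s.toList (by omega)]
      congr 1
      omega
    have hslice2 : PySem.Str.slice s none (some (PySem.Str.find s ","))
        = String.ofList (s.toList.take (PySem.Str.find s ",").toNat) := by
      simp only [PySem.Str.slice, PySem.Chars.slice_eq_listSlice]
      rw [PySem.List.slice_to (b := PySem.Str.find s ",") s.toList h0]
    rw [hslice1, hslice2]
    simp
  | case2 s acc h hne =>
    rw [pvSplitLoopA, dif_neg h, if_pos hne]
    have hnc : ',' ∉ s.toList := by
      apply (pvFind_neg_one_iff s.toList).mp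
      simp only [PySem.Str.find, pvCommaToList] at h
      simpa using h
    rw [pvSp_no_comma s.toList hnc]
    have hlne : s.toList ≠ [] := by
      intro hl
      exact hne (by cases s; simp_all)
    unfold pvDropTE
    rw [if_neg (by simp [hlne])]
    simp
  | case3 s acc h hne =>
    rw [pvSplitLoopA, dif_neg h, if_neg hne]
    have hs : s = "" := by by_contra hc; exact hne hc
    subst hs
    simp [pvSp, pvDropTE]

theorem pvRow_eq (xs : List String) (mc : Int) (d : String) :
    (PySem.List.pyRange 0 xs.length 1).foldl (fun row_data count =>
      row_data ++ [if count = mc then PySem.Str.strip d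
                   else PySem.Str.strip (PySem.List.pyGetD xs count "")]) []
    = if 0 ≤ mc ∧ mc < ((xs.map PySem.Str.strip).length : Int) then
        (xs.map PySem.Str.strip).set mc.toNat (PySem.Str.strip d)
      else xs.map PySem.Str.strip := by
  rw [PySem.List.foldl_append_singleton_eq_map
      (f := fun count => if count = mc then PySem.Str.strip d
                   else PySem.Str.strip (PySem.List.pyGetD xs count ""))]
  rw [PySem.List.pyRange_one]
  rw [List.map_map]
  simp only [List.nil_append, Int.sub_zero, Int.toNat_natCast, Function.comp_def, Int.zero_add]
  by_cases hin : 0 ≤ mc ∧ mc < ((xs.map PySem.Str.strip).length : Int)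
  · rw [if_pos hin]
    apply List.ext_getElem
    · simp
    · intro i h1 h2
      have hi : i < xs.length := by simpa using h1
      simp only [List.getElem_map, List.getElem_range]
      by_cases he : (i : Int) = mc
      · rw [if_pos he, List.getElem_set, if_pos (by omega)]
      · rw [if_neg he]
        have hget : PySem.List.pyGetD xs (i : Int) "" = xs[i] := by
          rw [PySem.List.pyGetD_natCast]
          exact List.getD_eq_getElem xs "" hi
        rw [hget, List.getElem_set, if_neg (by omega)]
        simp
  · rw [if_neg hin]
    apply List.ext_getElem
    · simp
    · intro i h1 h2
      have hi : i < xs.length := by simpa using h1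
      simp only [List.getElem_map, List.getElem_range]
      have he : (i : Int) ≠ mc := by
        intro hcc
        simp only [List.length_map] at hin
        omega
      rw [if_neg he]
      have hget : PySem.List.pyGetD xs (i : Int) "" = xs[i] := by
        rw [PySem.List.pyGetD_natCast]
        exact List.getD_eq_getElem xs "" hi
      rw [hget]

theorem pvValues_eq (cell_data : String) :
    (if ((PySem.Str.split? cell_data ",").getD []).getLast? = some "" then
       ((PySem.Str.split? cell_data ",").getD []).dropLast
     else (PySem.Str.split? cell_data ",").getD [])
    = (pvDropTE (pvSp cell_data.toList)).map String.ofList := by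
  have hv : (PySem.Str.split? cell_data ",").getD [] = (pvSp cell_data.toList).map String.ofList := by
    rw [PySem.Str.split?, PySem.Chars.split?]
    rw [if_neg (by rw [pvCommaToList]; simp)]
    rw [pvCommaToList, pvSp_eq_splitOn]
    rfl
  rw [hv]
  generalize pvSp cell_data.toList = L
  unfold pvDropTE
  by_cases hl : L.getLast? = some []
  · rw [if_pos hl, if_pos (by rw [List.getLast?_map, hl]; rfl)]
    rw [List.map_dropLast]
  · rw [if_neg hl, if_neg ?_]
    rw [List.getLast?_map]
    intro hc
    cases h : L.getLast? with
    | none => rw [h] at hc; simp at hc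
    | some x =>
      rw [h] at hc
      simp only [Option.map_some] at hc
      have hx : x = [] := by
        have := congrArg String.toList (Option.some.inj hc)
        simpa using this
      exact hl (by rw [h, hx])

theorem pvPointwise_eq (input_row : List String) (cell_data : String) (multi_count : Int) :
    create_multiple_rows input_row cell_data multi_count
      = create_multiple_rows_alt input_row cell_data multi_count := by
  unfold create_multiple_rows create_multiple_rows_alt
  rw [pvSplitLoopA_eq cell_data []]
  rw [PySem.List.foldl_append_singleton_eq_map]
  simp only [List.nil_append]
  rw [pvValues_eq cell_data]
  apply List.map_congr_left
  intro data _
  exact pvRow_eq input_row multi_count data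

-- ===== VERDICT (by name: the statement is the Claim_ definition above) =====
theorem create_multiple_rows_spec : Claim_equal_create_multiple_rows := by
  intro input_row cell_data multi_count _
  unfold Spec_create_multiple_rows
  exact pvPointwise_eq input_row cell_data multi_count
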